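-- pv_equiv track=rewrite | github.com/jefinagilbert/problemSolving | hr117_jimOrders.py | jimOrders
-- ===== SOURCE A (Python) =====
-- def jimOrders(orders):
--     llist = []
--     llist1 = []
--     llist2 = []
--     j = 1
--     k = 1
--     for i in orders:
--         llist.append(j)
--         llist1.append(sum(i))
--         j += 1
--     for i in range(len(llist)):
--         a = min(llist1)
--         b = llist1.index(a)
--         llist1.pop(b)
--         llist2.append(llist[b])
--         llist.pop(b)
--     return llist2
-- ===== SOURCE B (Python) =====
-- def jimOrders(orders):
--     pairs = [(sum(o), i) for i, o in enumerate(orders, 1)]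
--     pairs.sort(key=lambda p: p[0])
--     return [i for _, i in pairs]
-- ===== Notes on version B (the rewrite author's own statement) =====
-- stated objective: alternative
-- what changed: Replaces A's selection sort (repeated min-scan, index-scan and pop over two parallel lists) with a single stable library sort of (total, customer-number) pairs, relying on stability for the tie-break.
import Mathlib
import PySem

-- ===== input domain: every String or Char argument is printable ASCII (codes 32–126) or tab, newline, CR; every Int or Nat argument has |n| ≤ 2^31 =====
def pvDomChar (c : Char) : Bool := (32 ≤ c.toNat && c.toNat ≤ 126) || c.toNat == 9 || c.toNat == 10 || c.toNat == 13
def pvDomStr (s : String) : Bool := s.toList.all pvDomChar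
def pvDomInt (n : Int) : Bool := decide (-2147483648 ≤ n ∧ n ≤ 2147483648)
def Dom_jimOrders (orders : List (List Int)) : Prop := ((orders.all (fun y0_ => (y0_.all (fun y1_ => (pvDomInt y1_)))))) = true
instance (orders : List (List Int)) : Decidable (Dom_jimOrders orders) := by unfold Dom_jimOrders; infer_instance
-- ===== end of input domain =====

-- B replaces A's selection sort (repeated min/index/pop over parallel lists) with one stable
-- sort of (total, customer-number) pairs (a different algorithm; not measured as faster).

-- ===== PORT A =====
-- one iteration of A's second loop: a = min(llist1); b = llist1.index(a); llist1.pop(b);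
-- llist2.append(llist[b]); llist.pop(b).  State is (llist, llist1, llist2); the `none`
-- branches (empty list / bad index, where Python would raise) are unreachable because the
-- loop runs exactly len(llist) times over parallel lists.
def jimSelStep (st : List Int × List Int × List Int) : List Int × List Int × List Int :=
  match PySem.List.min? st.2.1 (fun x => x) with
  | none => st
  | some a =>
    match PySem.List.index? st.2.1 a with
    | none => st
    | some b =>
      match PySem.List.pop? st.2.1 (b : Int), PySem.List.pyGet? st.1 (b : Int),
            PySem.List.pop? st.1 (b : Int) with
      | some r1, some v, some r0 => (r0.2, r1.2, st.2.2 ++ [v])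
      | _, _, _ => st

def jimOrders (orders : List (List Int)) : List Int :=
  -- first loop: llist collects j = 1,2,…, llist1 collects sum(i)
  let b1 := orders.foldl (fun (s : List Int × List Int × Int) i =>
      (s.1 ++ [s.2.2], s.2.1 ++ [i.sum], s.2.2 + 1)) ([], [], 1)
  -- second loop: for i in range(len(llist)): select the minimum and move its id to llist2
  let fin := (List.range b1.1.length).foldl (fun st _ => jimSelStep st) (b1.1, b1.2.1, [])
  fin.2.2

-- ===== PORT B =====
def jimOrders_alt (orders : List (List Int)) : List Int :=
  let pairs := (PySem.List.enumerate orders 1).map (fun p => (p.2.sum, p.1))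
  let spairs := PySem.List.sorted pairs (fun p => p.1)
  spairs.map (fun p => p.2)

-- ===== PRECONDITION & SPEC =====
def Spec_jimOrders (orders : List (List Int)) (out : List Int) : Prop := out = jimOrders_alt orders
instance (orders : List (List Int)) (out : List Int) : Decidable (Spec_jimOrders orders out) := by unfold Spec_jimOrders; infer_instance

-- ===== CLAIM (what is proved, stated in full; the proofs are below) =====
def Claim_equal_jimOrders : Prop := ∀ (orders : List (List Int)), Dom_jimOrders orders → Spec_jimOrders orders (jimOrders orders)

-- ===== LEMMAS AND PROOFS =====

-- strict lexicographic order on (total, customer-number) pairs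
def JimLex (p q : Int × Int) : Prop := p.1 < q.1 ∨ (p.1 = q.1 ∧ p.2 < q.2)

lemma jim_build (orders : List (List Int)) (L S : List Int) (j : Int) :
    orders.foldl (fun (s : List Int × List Int × Int) i =>
        (s.1 ++ [s.2.2], s.2.1 ++ [i.sum], s.2.2 + 1)) (L, S, j)
    = (L ++ (PySem.List.enumerate orders j).map (fun p => p.1),
       S ++ orders.map (fun o => o.sum), j + orders.length) := by
  induction orders generalizing L S j with
  | nil => simp [PySem.List.enumerate_nil]
  | cons o rest ih =>
    rw [List.foldl_cons, ih, PySem.List.enumerate_cons]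
    simp only [List.map_cons, List.length_cons, Prod.mk.injEq]
    refine ⟨by simp, by simp, by push_cast; ring⟩

lemma foldl_range_ignore {σ : Type} (f : σ → σ) (n : Nat) (st : σ) :
    (List.range n).foldl (fun s _ => f s) st = f^[n] st := by
  induction n generalizing st with
  | zero => simp
  | succ n ih =>
    rw [List.range_succ, List.foldl_append, ih, Function.iterate_succ_apply']
    simp

lemma insertBy_lex (x : Int × Int) (acc : List (Int × Int))
    (hp : acc.Pairwise JimLex) (hlt : ∀ y ∈ acc, y.2 < x.2) :
    (PySem.List.insertBy (fun a b => decide (a.1 < b.1)) x acc).Pairwise JimLex := by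
  induction acc with
  | nil => simp [PySem.List.insertBy]
  | cons y t ih =>
    by_cases h : x.1 < y.1
    · have : PySem.List.insertBy (fun a b => decide (a.1 < b.1)) x (y :: t) = x :: y :: t := by
        simp [PySem.List.insertBy, h]
      rw [this]
      refine List.Pairwise.cons ?_ hp
      intro q hq
      rcases List.mem_cons.mp hq with rfl | hq
      · exact Or.inl h
      · rcases List.rel_of_pairwise_cons hp hq with h1 | ⟨h1, _⟩
        · exact Or.inl (lt_trans h h1)
        · exact Or.inl (h1 ▸ h)
    · have : PySem.List.insertBy (fun a b => decide (a.1 < b.1)) x (y :: t)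
          = y :: PySem.List.insertBy (fun a b => decide (a.1 < b.1)) x t := by
        simp [PySem.List.insertBy, h]
      rw [this]
      refine List.Pairwise.cons ?_ (ih hp.of_cons (fun q hq => hlt q (List.mem_cons_of_mem _ hq)))
      intro q hq
      rcases (PySem.List.mem_insertBy _ _ _ _).mp hq with rfl | hq
      · rcases lt_or_eq_of_le (not_lt.mp h) with h1 | h1
        · exact Or.inl h1
        · exact Or.inr ⟨h1, hlt y (List.mem_cons_self)⟩
      · exact List.rel_of_pairwise_cons hp hq

lemma foldl_ins_lex (ps acc : List (Int × Int))
    (hacc : acc.Pairwise JimLex)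
    (hsep : ∀ x ∈ acc, ∀ r ∈ ps, x.2 < r.2)
    (hps : ps.Pairwise (fun p q => p.2 < q.2)) :
    (ps.foldl (fun a x => PySem.List.insertBy (fun a b => decide (a.1 < b.1)) x a) acc).Pairwise JimLex := by
  induction ps generalizing acc with
  | nil => exact hacc
  | cons p rest ih =>
    simp only [List.foldl_cons]
    refine ih _ (insertBy_lex p acc hacc (fun y hy => hsep y hy p List.mem_cons_self)) ?_ hps.of_cons
    intro x hx r hr
    rcases (PySem.List.mem_insertBy _ _ _ _).mp hx with rfl | hx
    · exact List.rel_of_pairwise_cons hps hr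
    · exact hsep x hx r (List.mem_cons_of_mem _ hr)

lemma sorted_fst_lex (ps : List (Int × Int)) (h : ps.Pairwise (fun p q => p.2 < q.2)) :
    (PySem.List.sorted ps (fun p => p.1)).Pairwise JimLex := by
  rw [PySem.List.sorted_eq_foldl_insertBy]
  exact foldl_ins_lex ps [] (by simp) (by simp) h

lemma sel_spec : ∀ (n : Nat) (zs : List (Int × Int)) (out : List Int), zs.length = n →
    zs.Pairwise (fun p q => p.2 < q.2) →
    ∃ ys : List (Int × Int), ys.Perm zs ∧ ys.Pairwise JimLex ∧
      jimSelStep^[n] (zs.map (fun p => p.2), zs.map (fun p => p.1), out)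
        = ([], [], out ++ ys.map (fun p => p.2)) := by
  intro n
  induction n with
  | zero =>
    intro zs out hlen _
    rw [List.length_eq_zero_iff] at hlen
    exact ⟨[], by simp [hlen], by simp, by simp [hlen]⟩
  | succ n ih =>
    intro zs out hlen hpw
    have hne : zs.map (fun p => p.1) ≠ [] := by
      simp only [ne_eq, List.map_eq_nil_iff]
      intro h; rw [h] at hlen; simp at hlen
    obtain ⟨a, ha⟩ : ∃ a, PySem.List.min? (zs.map (fun p => p.1)) (fun x => x) = some a := by
      cases hm : PySem.List.min? (zs.map (fun p => p.1)) (fun x => x) with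
      | none => exact absurd ((PySem.List.min?_eq_none_iff _ _).mp hm) hne
      | some a => exact ⟨a, rfl⟩
    have hamem : a ∈ zs.map (fun p => p.1) := PySem.List.min?_mem ha
    obtain ⟨b, hbidx⟩ : ∃ b, PySem.List.index? (zs.map (fun p => p.1)) a = some b := by
      cases hi : PySem.List.index? (zs.map (fun p => p.1)) a with
      | none => exact absurd hamem ((PySem.List.index?_eq_none_iff _ _).mp hi)
      | some b => exact ⟨b, rfl⟩
    obtain ⟨hblt, hbval, hbfirst⟩ := PySem.List.getElem_of_index?_eq_some hbidx
    have hbzs : b < zs.length := by simpa using hblt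
    -- one step of the loop
    have hstep : jimSelStep (zs.map (fun p => p.2), zs.map (fun p => p.1), out)
        = ((zs.eraseIdx b).map (fun p => p.2), (zs.eraseIdx b).map (fun p => p.1),
           out ++ [zs[b].2]) := by
      have hget : PySem.List.pyGet? (zs.map (fun p => p.2)) (b : Int) = some zs[b].2 := by
        rw [PySem.List.pyGet?_natCast]
        simp [hbzs]
      simp only [jimSelStep, ha, hbidx,
        PySem.List.pop?_natCast _ _ hblt,
        PySem.List.pop?_natCast _ _ (show b < (zs.map (fun p => p.2)).length by simpa using hbzs),
        hget, List.eraseIdx_map]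
    have hpw' : (zs.eraseIdx b).Pairwise (fun p q => p.2 < q.2) :=
      hpw.sublist (List.eraseIdx_sublist zs b)
    have hlen' : (zs.eraseIdx b).length = n := by
      rw [List.length_eraseIdx_of_lt hbzs, hlen]; omega
    obtain ⟨ys', hperm', hpw'', heq'⟩ := ih (zs.eraseIdx b) (out ++ [zs[b].2]) hlen' hpw'
    refine ⟨zs[b] :: ys', ?_, ?_, ?_⟩
    · exact (hperm'.cons zs[b]).trans (List.getElem_cons_eraseIdx_perm hbzs)
    · refine List.Pairwise.cons ?_ hpw''
      intro q hq
      have hq' : q ∈ zs.eraseIdx b := hperm'.mem_iff.mp hq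
      obtain ⟨j, hj, hjb, hjq⟩ := List.mem_eraseIdx_iff_getElem.mp hq'
      have hba : zs[b].1 = a := by
        have := hbval; rwa [List.getElem_map] at this
      have hle : a ≤ q.1 := PySem.List.min?_isMin ha q.1 (by
        subst hjq; exact List.mem_map_of_mem (List.getElem_mem hj))
      rcases lt_or_eq_of_le hle with h1 | h1
      · exact Or.inl (hba ▸ h1)
      · -- tie on the total: q = zs[j] with j > b, so snd increases
        have hjgt : b < j := by
          rcases Nat.lt_or_ge j b with hjb' | hge
          · exfalso
            apply hbfirst j (by simpa using hjb')
            rw [List.getElem_map, hjq, ← h1]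
          · exact lt_of_le_of_ne hge (Ne.symm hjb)
        have := List.pairwise_iff_getElem.mp hpw b j hbzs hj hjgt
        exact Or.inr ⟨by rw [hba, h1], by rw [← hjq]; exact this⟩
    · rw [Function.iterate_succ_apply, hstep, heq']
      simp
lemma jimlex_antisymm (p q : Int × Int) : JimLex p q → JimLex q p → p = q := by
  rintro (h1 | ⟨h1, h1'⟩) (h2 | ⟨h2, h2'⟩) <;> (exfalso; omega)

-- ===== VERDICT (by name: the statement is the Claim_ definition above) =====
theorem jimOrders_spec : Claim_equal_jimOrders := by
  intro orders _
  unfold Spec_jimOrders jimOrders jimOrders_alt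
  simp only [jim_build orders [] [] 1, List.nil_append]
  set pairs : List (Int × Int) := (PySem.List.enumerate orders 1).map (fun p => (p.2.sum, p.1)) with hpairs
  have hids : (PySem.List.enumerate orders 1).map (fun p => p.1) = pairs.map (fun p => p.2) := by
    simp [hpairs, List.map_map, Function.comp_def]
  have hsums : orders.map (fun o => o.sum) = pairs.map (fun p => p.1) := by
    simp only [hpairs, List.map_map, Function.comp_def]
    conv_lhs => rw [← PySem.List.map_snd_enumerate orders 1, List.map_map]
    rfl
  have hpw : pairs.Pairwise (fun p q => p.2 < q.2) := by
    refine List.Pairwise.map _ ?_ (PySem.List.pairwise_lt_enumerate orders 1)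
    intro p q h; exact h
  obtain ⟨ys, hperm, hlex, heq⟩ := sel_spec pairs.length pairs [] rfl hpw
  rw [hids, hsums, show (pairs.map (fun p => p.2)).length = pairs.length from by simp,
    foldl_range_ignore, heq]
  have hsortlex : (PySem.List.sorted pairs (fun p => p.1)).Pairwise JimLex := sorted_fst_lex pairs hpw
  have hsperm : (PySem.List.sorted pairs (fun p => p.1)).Perm pairs :=
    PySem.List.sorted_perm pairs _ false
  have : ys = PySem.List.sorted pairs (fun p => p.1) :=
    List.Perm.eq_of_pairwise (fun a b _ _ h1 h2 => jimlex_antisymm a b h1 h2)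
      hlex hsortlex (hperm.trans hsperm.symm)
  rw [this]
  simp
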